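-- pv_equiv track=rewrite | github.com/Methiniyan/Advanced-Biotech-assessment-2024 | biotech assessment final code.py | loc
-- ===== SOURCE A (Python) =====
-- def loc(row):
--     wt_seq = row["WildType.Sequence"]
--     mut_seq = row["Mutant.Sequence"]
--
--     mut_loc = [i for i in range(min(len(wt_seq), len(mut_seq))) if wt_seq[i] != mut_seq[i]]
--
--     if any(position < 1000 for position in mut_loc):
--         return "promoter"
--     elif any(position >= 1000 for position in mut_loc):
--         return "CDS"
--     else:
--         return "no mutation"
-- ===== SOURCE B (Python) =====
-- def loc(row):
--     wt_seq = row["WildType.Sequence"]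
--     mut_seq = row["Mutant.Sequence"]
--     for i, (a, b) in enumerate(zip(wt_seq, mut_seq)):
--         if a != b:
--             return "promoter" if i < 1000 else "CDS"
--     return "no mutation"
-- ===== Notes on version B (the rewrite author's own statement) =====
-- stated objective: simpler
-- what changed: Instead of building the full list of mismatch positions and scanning it twice with any(), B walks the zipped sequences once and returns at the first differing position, whose value alone determines the class.
import Mathlib
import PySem

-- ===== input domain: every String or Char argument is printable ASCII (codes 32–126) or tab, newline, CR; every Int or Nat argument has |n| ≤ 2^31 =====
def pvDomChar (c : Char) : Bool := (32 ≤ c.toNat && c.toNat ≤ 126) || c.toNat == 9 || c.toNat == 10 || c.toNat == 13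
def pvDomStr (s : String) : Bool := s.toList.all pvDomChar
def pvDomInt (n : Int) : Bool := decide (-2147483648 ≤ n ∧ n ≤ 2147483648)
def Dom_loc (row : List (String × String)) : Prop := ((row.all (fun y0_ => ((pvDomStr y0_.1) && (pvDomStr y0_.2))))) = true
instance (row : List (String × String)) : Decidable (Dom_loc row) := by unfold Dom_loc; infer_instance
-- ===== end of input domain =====

-- One honest line: B returns at the first differing position of the two sequences
-- instead of building the full mismatch list and scanning it twice; objective: simpler.

-- ===== PORT A =====
-- Python dict lookup row[k]: first matching key of the association list (none = KeyError).
def pyLookupA (row : List (String × String)) (k : String) : Option String :=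
  (row.find? (fun p => p.1 == k)).map (·.2)

def loc (row : List (String × String)) : String :=
  match pyLookupA row "WildType.Sequence", pyLookupA row "Mutant.Sequence" with
  | some wt_seq, some mut_seq =>
    let mut_loc := (PySem.List.pyRange 0 (min (PySem.Str.len wt_seq) (PySem.Str.len mut_seq)) 1).filter
      (fun i => PySem.Str.pyGet? wt_seq i != PySem.Str.pyGet? mut_seq i)
    if mut_loc.any (fun position => position < 1000) then "promoter"
    else if mut_loc.any (fun position => position ≥ 1000) then "CDS"
    else "no mutation"
  | _, _ => ""   -- KeyError: excluded by Pre_loc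

-- ===== PORT B =====
-- Python dict lookup row[k] again, for B's port (none = KeyError).
def pyLookupB (row : List (String × String)) (k : String) : Option String :=
  (row.find? (fun p => p.1 == k)).map (·.2)

-- the for-loop over enumerate(zip(wt, mut)): simultaneous recursion carrying the index i
def locGo : List Char → List Char → Int → String
  | a :: as, b :: bs, i =>
    if a ≠ b then (if i < 1000 then "promoter" else "CDS")
    else locGo as bs (i + 1)
  | _, _, _ => "no mutation"

def loc_alt (row : List (String × String)) : String :=
  match pyLookupB row "WildType.Sequence" with
  | none => ""   -- KeyError: excluded by Pre_loc
  | some wt_seq =>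
    match pyLookupB row "Mutant.Sequence" with
    | none => ""   -- KeyError: excluded by Pre_loc
    | some mut_seq => locGo wt_seq.toList mut_seq.toList 0

-- ===== PRECONDITION & SPEC =====
-- Pre_loc: both keys present (Python raises KeyError otherwise).
def Pre_loc (row : List (String × String)) : Prop :=
  "WildType.Sequence" ∈ row.map Prod.fst ∧ "Mutant.Sequence" ∈ row.map Prod.fst
instance (row : List (String × String)) : Decidable (Pre_loc row) := by unfold Pre_loc; infer_instance

def pvWitness_loc : (List (String × String)) :=
  [("WildType.Sequence", "ACGT"), ("Mutant.Sequence", "ACGA")]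

def Spec_loc (row : List (String × String)) (out : String) : Prop := out = loc_alt row
instance (row : List (String × String)) (out : String) : Decidable (Spec_loc row out) := by unfold Spec_loc; infer_instance

-- ===== CLAIM (what is proved, stated in full; the proofs are below) =====
def Claim_equal_loc : Prop := ∀ (row : List (String × String)), Dom_loc row → Pre_loc row → Spec_loc row (loc row)

-- ===== LEMMAS AND PROOFS =====

-- A's computation on the character lists, with Nat indices and an offset k (k = 0 is A).
def aForm (wa ma : List Char) (k : Int) : String :=
  let L := (List.range (min wa.length ma.length)).filter (fun i => wa[i]? != ma[i]?)
  if L.any (fun i => (i : Int) + k < 1000) then "promoter"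
  else if L.any (fun i => (i : Int) + k ≥ 1000) then "CDS"
  else "no mutation"

theorem filter_range_cons (a b : Char) (as bs : List Char) :
    List.filter (fun i => (a::as)[i]? != (b::bs)[i]?) (List.range (min as.length bs.length + 1))
    = (if a != b then [0] else []) ++
      ((List.range (min as.length bs.length)).filter (fun i => as[i]? != bs[i]?)).map (· + 1) := by
  simp only [List.range_succ_eq_map, List.filter_cons,
    List.getElem?_cons_zero, List.filter_map, Function.comp_def, List.getElem?_cons_succ]
  by_cases hab : a = b <;> simp [hab]

theorem locGo_eq_aForm (wa ma : List Char) (k : Int) : locGo wa ma k = aForm wa ma k := by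
  induction wa generalizing ma k with
  | nil => cases ma <;> simp [locGo, aForm]
  | cons a as ih =>
    cases ma with
    | nil => simp [locGo, aForm]
    | cons b bs =>
      rw [locGo, ih bs (k + 1)]
      have e1 : (fun i : Nat => decide ((i : Int) + 1 + k < 1000)) =
          (fun i : Nat => decide ((i : Int) + (k + 1) < 1000)) := by
        funext i; simp only [decide_eq_decide]; omega
      have e2 : (fun i : Nat => decide ((i : Int) + 1 + k ≥ 1000)) =
          (fun i : Nat => decide ((i : Int) + (k + 1) ≥ 1000)) := by
        funext i; simp only [decide_eq_decide]; omega
      simp only [aForm, List.length_cons, Nat.add_min_add_right, filter_range_cons]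
      by_cases hab : a = b
      · subst hab
        simp only [bne_self_eq_false, Bool.false_eq_true, if_false, List.nil_append,
          List.any_map, Function.comp_def, Nat.cast_add, Nat.cast_one, e1, e2]
        simp
      · have hb : (a != b) = true := by simpa using hab
        by_cases hk : k < 1000
        · simp [hab, hb, hk, Function.comp_def]
        · have hfalse : ∀ (M : List Nat),
              (M.any fun i => decide ((i : Int) + 1 + k < 1000)) = false := by
            intro M
            simp only [List.any_eq_false, decide_eq_true_eq]
            intro i _
            omega
          simp [hab, hb, hk, hfalse, Function.comp_def]
theorem aCore_eq (wt mu : String) :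
    (if ((PySem.List.pyRange 0 (min (PySem.Str.len wt) (PySem.Str.len mu)) 1).filter
          (fun i => PySem.Str.pyGet? wt i != PySem.Str.pyGet? mu i)).any
            (fun position => position < 1000) then "promoter"
     else if ((PySem.List.pyRange 0 (min (PySem.Str.len wt) (PySem.Str.len mu)) 1).filter
          (fun i => PySem.Str.pyGet? wt i != PySem.Str.pyGet? mu i)).any
            (fun position => position ≥ 1000) then "CDS"
     else "no mutation") = aForm wt.toList mu.toList 0 := by
  have hn : ((min (PySem.Str.len wt) (PySem.Str.len mu) - 0).toNat)
      = min wt.toList.length mu.toList.length := by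
    simp only [PySem.Str.len_eq]
    omega
  rw [PySem.List.pyRange_one, hn, aForm]
  rw [List.filter_map]
  simp only [zero_add, Function.comp_def, List.any_map, add_zero,
    PySem.Str.pyGet?_natCast]

theorem loc_eq_alt (row : List (String × String)) : loc row = loc_alt row := by
  rw [loc, loc_alt]
  have hA : pyLookupA = pyLookupB := rfl
  rw [hA]
  cases pyLookupB row "WildType.Sequence" with
  | none => rfl
  | some wt =>
    cases pyLookupB row "Mutant.Sequence" with
    | none => rfl
    | some mu =>
      exact (aCore_eq wt mu).trans (locGo_eq_aForm wt.toList mu.toList 0).symm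

theorem loc_spec : Claim_equal_loc := by
  intro row _ _
  unfold Spec_loc
  exact loc_eq_alt row
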